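-- pv_equiv track=rewrite | github.com/ftmzhrasafaei/sudoku-solver | sudoku-solver.py | MinInTable
-- ===== SOURCE A (Python) =====
-- def MinInTable(t):
--     mint = t[0][0]
--     pos = (0 , 0)
--     for i in range(len(t)):
--         for j in range(len(t[0])):
--             if t[i][j] < mint :
--                 mint = t[i][j]
--                 pos = (i , j)
--     return pos
-- ===== SOURCE B (Python) =====
-- def _row_best(row, w):
--     bv = row[0]
--     bj = 0
--     for j in range(1, w):
--         if row[j] < bv:
--             bv = row[j]
--             bj = j
--     return (bv, bj)
--
--
-- def MinInTable(t):
--     w = len(t[0])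
--     bests = [_row_best(row, w) for row in t]
--     bv, bj = bests[0]
--     bi = 0
--     for i in range(1, len(bests)):
--         v, j = bests[i]
--         if v < bv:
--             bv = v
--             bi = i
--             bj = j
--     return (bi, bj)
-- ===== Notes on version B (the rewrite author's own statement) =====
-- stated objective: alternative
-- what changed: Replaces A's single nested scan carrying one global (min,pos) state with a two-phase decomposition: first a per-row pass computing each row's (min,argmin), then a second pass over that row-minima table selecting the best row.
import Mathlib
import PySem

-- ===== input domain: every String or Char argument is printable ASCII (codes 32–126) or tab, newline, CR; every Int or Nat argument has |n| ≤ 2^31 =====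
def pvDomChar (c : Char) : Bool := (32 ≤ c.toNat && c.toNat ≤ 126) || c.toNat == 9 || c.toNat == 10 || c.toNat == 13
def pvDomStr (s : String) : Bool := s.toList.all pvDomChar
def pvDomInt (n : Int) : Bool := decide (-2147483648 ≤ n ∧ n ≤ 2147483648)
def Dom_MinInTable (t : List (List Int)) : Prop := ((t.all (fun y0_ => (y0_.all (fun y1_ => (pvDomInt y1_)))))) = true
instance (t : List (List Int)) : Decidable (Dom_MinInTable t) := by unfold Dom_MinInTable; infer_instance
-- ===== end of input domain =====

-- B replaces A's single nested scan with a two-phase decomposition (per-row minima table, then a pass selecting the best row); same cost, alternative structure.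


-- ===== PORT A =====
def MinInTable (t : List (List Int)) : Int × Int :=
  let mint := PySem.List.pyGetD (PySem.List.pyGetD t 0 []) 0 0
  let pos : Int × Int := (0, 0)
  let st := (PySem.List.pyRange 0 t.length 1).foldl
    (fun st i =>
      (PySem.List.pyRange 0 (PySem.List.pyGetD t 0 []).length 1).foldl
        (fun st j =>
          if PySem.List.pyGetD (PySem.List.pyGetD t i []) j 0 < st.1 then
            (PySem.List.pyGetD (PySem.List.pyGetD t i []) j 0, (i, j))
          else st) st) (mint, pos)
  st.2

-- ===== PORT B =====
-- port of Source B's _row_best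
def rowBest (row : List Int) (w : Nat) : Int × Int :=
  (PySem.List.pyRange 1 w 1).foldl
    (fun st j =>
      if PySem.List.pyGetD row j 0 < st.1 then (PySem.List.pyGetD row j 0, j) else st)
    (PySem.List.pyGetD row 0 0, 0)

def MinInTable_alt (t : List (List Int)) : Int × Int :=
  let w := (PySem.List.pyGetD t 0 []).length
  let bests := t.map (fun row => rowBest row w)
  let b0 := PySem.List.pyGetD bests 0 (0, 0)
  let st := (PySem.List.pyRange 1 bests.length 1).foldl
    (fun st i =>
      if (PySem.List.pyGetD bests i (0, 0)).1 < st.1 then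
        ((PySem.List.pyGetD bests i (0, 0)).1, i, (PySem.List.pyGetD bests i (0, 0)).2)
      else st)
    (b0.1, 0, b0.2)
  (st.2.1, st.2.2)

-- ===== PRECONDITION & SPEC =====
-- Pre_ is exactly the set of inputs where Python A returns: a nonempty table with a
-- nonempty first row, and every row at least as long as the first (else IndexError).
def Pre_MinInTable (t : List (List Int)) : Prop :=
  t ≠ [] ∧ 0 < (t.headD []).length ∧ ∀ r ∈ t, (t.headD []).length ≤ r.length
instance (t : List (List Int)) : Decidable (Pre_MinInTable t) := by
  unfold Pre_MinInTable; infer_instance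
def pvWitness_MinInTable : List (List Int) := [[3, 1], [2, 0]]
def Spec_MinInTable (t : List (List Int)) (out : Int × Int) : Prop := out = MinInTable_alt t
instance (t : List (List Int)) (out : Int × Int) : Decidable (Spec_MinInTable t out) := by
  unfold Spec_MinInTable; infer_instance

-- ===== CLAIM (what is proved, stated in full; the proofs are below) =====
def Claim_equal_MinInTable : Prop :=
  ∀ (t : List (List Int)), Dom_MinInTable t → Pre_MinInTable t → Spec_MinInTable t (MinInTable t)

-- ===== LEMMAS AND PROOFS =====

-- the common "select with strict <" loop body of both programs
def selStep {π : Type} (a : Int → Int) (h : Int → π) (st : Int × π) (j : Int) : Int × π :=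
  if a j < st.1 then (a j, h j) else st

lemma sel_cons {π : Type} (a : Int → Int) (h : Int → π) (s : Int × π) (j : Int)
    (js : List Int) :
    (j :: js).foldl (selStep a h) s =
      (if (js.foldl (selStep a h) (a j, h j)).1 < s.1
        then js.foldl (selStep a h) (a j, h j) else s) := by
  induction js generalizing s j with
  | nil => simp [selStep]
  | cons j' js' ih =>
    have l1 := ih (selStep a h s j) j'
    have l2 := ih (a j, h j) j'
    simp only [List.foldl_cons] at *
    rw [l1, l2]
    simp only [selStep]
    split_ifs <;> first | rfl | omega

lemma sel_stay {π : Type} (a : Int → Int) (h : Int → π) (s : Int × π) (js : List Int) :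
    js.foldl (selStep a h) s = s ∨ (js.foldl (selStep a h) s).1 < s.1 := by
  induction js generalizing s with
  | nil => exact Or.inl rfl
  | cons j js ih =>
    simp only [List.foldl_cons]
    rcases ih (selStep a h s j) with h1 | h1 <;> rw [selStep] at * <;> split_ifs at * with hc
    · rw [h1]; right; simpa using hc
    · exact Or.inl h1
    · right; simp at h1; omega
    · exact Or.inr h1

lemma sel_map {π σ : Type} (a : Int → Int) (h : Int → π) (φ : π → σ) (v : Int) (p : π)
    (js : List Int) :
    js.foldl (selStep a (fun j => φ (h j))) (v, φ p) =
      ((js.foldl (selStep a h) (v, p)).1, φ (js.foldl (selStep a h) (v, p)).2) := by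
  induction js generalizing v p with
  | nil => rfl
  | cons j js ih =>
    simp only [List.foldl_cons, selStep]
    by_cases hc : a j < v <;> simp only [hc, if_true, if_false]
    · exact ih (a j) (h j)
    · exact ih v p

-- abbreviations for the canonical selection data of table t (proof-only helpers)
def pvA (t : List (List Int)) (w : Nat) : Int → Int :=
  fun i => (rowBest (PySem.List.pyGetD t i []) w).1
def pvH (t : List (List Int)) (w : Nat) : Int → Int × Int :=
  fun i => (i, (rowBest (PySem.List.pyGetD t i []) w).2)

lemma inner_eq (t : List (List Int)) (w : Nat) (hw : 0 < w) (st : Int × (Int × Int)) (i : Int) :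
    (PySem.List.pyRange 0 (w : Int) 1).foldl
      (selStep (fun j => PySem.List.pyGetD (PySem.List.pyGetD t i []) j 0)
               (fun j => ((i : Int), j))) st
      = selStep (pvA t w) (pvH t w) st i := by
  have hw' : (0 : Int) < (w : Int) := by exact_mod_cast hw
  rw [PySem.List.pyRange_one_cons hw']
  rw [sel_cons]
  have hmap := sel_map (fun j => PySem.List.pyGetD (PySem.List.pyGetD t i []) j 0)
      (fun j => j) (fun j => ((i : Int), j))
      (PySem.List.pyGetD (PySem.List.pyGetD t i []) 0 0) 0
      (PySem.List.pyRange (0 + 1) (w : Int) 1)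
  rw [hmap]
  simp only [selStep, pvA, pvH, rowBest]
  norm_num
  rfl

-- the canonical second-phase fold both programs reduce to
def pvRm (r0 : List Int) (rs : List (List Int)) : Int × (Int × Int) :=
  (PySem.List.pyRange 1 (((r0 :: rs).length : Int)) 1).foldl
    (selStep (pvA (r0 :: rs) r0.length) (pvH (r0 :: rs) r0.length))
    (pvA (r0 :: rs) r0.length 0, pvH (r0 :: rs) r0.length 0)

lemma afold_eq (r0 : List Int) (rs : List (List Int)) (hw : 0 < r0.length)
    (init : Int × Int × Int) :
    (PySem.List.pyRange 0 (((r0 :: rs).length : Int)) 1).foldl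
      (fun st i => (PySem.List.pyRange 0 ((r0.length : Int)) 1).foldl
        (fun st j =>
          if PySem.List.pyGetD (PySem.List.pyGetD (r0 :: rs) i []) j 0 < st.1 then
            (PySem.List.pyGetD (PySem.List.pyGetD (r0 :: rs) i []) j 0, (i, j))
          else st) st) init
    = (PySem.List.pyRange 0 (((r0 :: rs).length : Int)) 1).foldl
        (selStep (pvA (r0 :: rs) r0.length) (pvH (r0 :: rs) r0.length)) init :=
  PySem.List.foldl_congr_mem _ _ _ _ (fun acc i _ => inner_eq (r0 :: rs) r0.length hw acc i)

lemma A_char (r0 : List Int) (rs : List (List Int)) (hw : 0 < r0.length) :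
    MinInTable (r0 :: rs) =
      (if (pvRm r0 rs).1 < PySem.List.pyGetD r0 0 0 then pvRm r0 rs
       else (PySem.List.pyGetD r0 0 0, ((0 : Int), (0 : Int)))).2 := by
  unfold MinInTable
  simp only [PySem.List.pyGetD_zero_cons]
  rw [afold_eq r0 rs hw]
  rw [PySem.List.pyRange_one_cons (show (0 : Int) < ((r0 :: rs).length : Int) by simp)]
  rw [sel_cons]
  norm_num [pvRm]

lemma bfold_eq (r0 : List Int) (rs : List (List Int)) (init : Int × Int × Int) :
    (PySem.List.pyRange 1 ((((r0 :: rs).map (fun row => rowBest row r0.length)).length : Int)) 1).foldl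
      (fun st i =>
        if (PySem.List.pyGetD ((r0 :: rs).map (fun row => rowBest row r0.length)) i ((0 : Int), (0 : Int))).1 < st.1 then
          ((PySem.List.pyGetD ((r0 :: rs).map (fun row => rowBest row r0.length)) i ((0 : Int), (0 : Int))).1, i,
           (PySem.List.pyGetD ((r0 :: rs).map (fun row => rowBest row r0.length)) i ((0 : Int), (0 : Int))).2)
        else st) init
    = (PySem.List.pyRange 1 (((r0 :: rs).length : Int)) 1).foldl
        (selStep (pvA (r0 :: rs) r0.length) (pvH (r0 :: rs) r0.length)) init := by
  rw [show ((((r0 :: rs).map (fun row => rowBest row r0.length)).length : Int)) = (((r0 :: rs).length : Int)) by simp]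
  refine PySem.List.foldl_congr_mem _ _ _ _ ?_
  intro acc i hmem
  rw [PySem.List.mem_pyRange_one] at hmem
  have h0 : (0 : Int) ≤ i := by omega
  have hlt : i.toNat < (r0 :: rs).length := by omega
  have hget : PySem.List.pyGetD ((r0 :: rs).map (fun row => rowBest row r0.length)) i ((0 : Int), (0 : Int))
      = rowBest (PySem.List.pyGetD (r0 :: rs) i []) r0.length := by
    rw [PySem.List.pyGetD_eq_getElem _ _ h0 (by simpa using hmem.2),
        PySem.List.pyGetD_eq_getElem _ _ h0 hmem.2]
    rw [List.getElem_map]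
  rw [hget]
  simp [selStep, pvA, pvH]

lemma B_char (r0 : List Int) (rs : List (List Int)) :
    MinInTable_alt (r0 :: rs) = (pvRm r0 rs).2 := by
  unfold MinInTable_alt
  simp only [PySem.List.pyGetD_zero_cons]
  rw [bfold_eq]
  have hb0 : PySem.List.pyGetD ((r0 :: rs).map (fun row => rowBest row r0.length)) 0 ((0 : Int), (0 : Int))
      = rowBest r0 r0.length := by
    simp [PySem.List.pyGetD_zero_cons]
  rw [hb0]
  have hinit : ((rowBest r0 r0.length).1, ((0 : Int), (rowBest r0 r0.length).2))
      = (pvA (r0 :: rs) r0.length 0, pvH (r0 :: rs) r0.length 0) := by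
    simp [pvA, pvH, PySem.List.pyGetD_zero_cons]
  rw [hinit]
  rfl

lemma main_eq (r0 : List Int) (rs : List (List Int)) (hw : 0 < r0.length) :
    MinInTable (r0 :: rs) = MinInTable_alt (r0 :: rs) := by
  rw [A_char r0 rs hw, B_char r0 rs]
  by_cases hc : (pvRm r0 rs).1 < PySem.List.pyGetD r0 0 0
  · rw [if_pos hc]
  · rw [if_neg hc]
    have hrb : rowBest r0 r0.length = (PySem.List.pyGetD r0 0 0, 0) ∨
        (rowBest r0 r0.length).1 < PySem.List.pyGetD r0 0 0 :=
      sel_stay (fun j => PySem.List.pyGetD r0 j 0) (fun j => j)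
        (PySem.List.pyGetD r0 0 0, 0) (PySem.List.pyRange 1 ((r0.length : Int)) 1)
    have hstay : pvRm r0 rs = (pvA (r0 :: rs) r0.length 0, pvH (r0 :: rs) r0.length 0) ∨
        (pvRm r0 rs).1 < (pvA (r0 :: rs) r0.length 0, pvH (r0 :: rs) r0.length 0).1 :=
      sel_stay (pvA (r0 :: rs) r0.length) (pvH (r0 :: rs) r0.length)
        (pvA (r0 :: rs) r0.length 0, pvH (r0 :: rs) r0.length 0)
        (PySem.List.pyRange 1 (((r0 :: rs).length : Int)) 1)
    have hA0 : pvA (r0 :: rs) r0.length 0 = (rowBest r0 r0.length).1 := by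
      simp [pvA, PySem.List.pyGetD_zero_cons]
    have hH0 : pvH (r0 :: rs) r0.length 0 = ((0 : Int), (rowBest r0 r0.length).2) := by
      simp [pvH, PySem.List.pyGetD_zero_cons]
    rcases hstay with h1 | h1
    · rcases hrb with h2 | h2
      · rw [h1, hH0, h2]
      · exfalso
        apply hc
        rw [h1]
        simp only [hA0]
        exact h2
    · exfalso
      apply hc
      simp only [hA0] at h1
      rcases hrb with h2 | h2
      · rw [h2] at h1
        simpa using h1
      · exact lt_trans h1 h2

-- ===== VERDICT (by name: the statement is the Claim_ definition above) =====
theorem MinInTable_spec : Claim_equal_MinInTable := by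
  intro t _ hpre
  obtain ⟨hne, hw, -⟩ := hpre
  obtain ⟨r0, rs, rfl⟩ := List.exists_cons_of_ne_nil hne
  simp only [List.headD_cons] at hw
  exact main_eq r0 rs hw
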